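-- pv_equiv track=rewrite | github.com/hplatter/othello | OthelloHunt.py | validChain
-- ===== SOURCE A (Python) =====
-- def validChain(chain):
--     valid = False
--     if len(chain) > 1:
--         if not chain[0] == chain[1] and not chain[0] == 0:
--             for item in chain[1:]:
--                 if item == 0:
--                     return False
--                 if item == chain[0]:
--                     return True
--     return valid
-- ===== SOURCE B (Python) =====
-- def validChain(chain):
--     if len(chain) <= 1 or chain[0] == 0 or chain[0] == chain[1]:
--         return False
--     rest = chain[1:]
--     cut = rest.index(0) if 0 in rest else len(rest)
--     return chain[0] in rest[:cut]
-- ===== Notes on version B (the rewrite author's own statement) =====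
-- stated objective: simpler
-- what changed: Replaces A's single early-exit scan with a guard chain plus a find-the-first-zero-then-test-prefix-membership decomposition (index/slice/in instead of a combined loop).
import Mathlib
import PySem

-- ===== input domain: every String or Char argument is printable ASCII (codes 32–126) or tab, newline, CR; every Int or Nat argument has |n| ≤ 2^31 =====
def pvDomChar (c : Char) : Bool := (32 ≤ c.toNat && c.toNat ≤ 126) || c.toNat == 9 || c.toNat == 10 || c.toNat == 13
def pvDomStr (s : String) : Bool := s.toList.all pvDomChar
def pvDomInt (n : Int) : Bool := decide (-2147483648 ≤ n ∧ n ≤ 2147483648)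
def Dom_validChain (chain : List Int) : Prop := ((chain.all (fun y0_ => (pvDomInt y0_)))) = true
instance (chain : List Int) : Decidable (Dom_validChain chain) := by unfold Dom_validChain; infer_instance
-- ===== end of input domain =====

-- B keeps A's three guards but replaces the combined early-exit loop by
-- find-the-first-zero then prefix-membership; simpler decomposition, same cost.

-- ===== PORT A =====
-- the 'for item in chain[1:]' loop with its two early returns
def validChainLoop (c0 : Int) : List Int → Bool
  | [] => false
  | item :: rest =>
    if item == 0 then false
    else if item == c0 then true
    else validChainLoop c0 rest

def validChain (chain : List Int) : Bool :=
  match chain with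
  | a :: b :: rest =>
    if !(a == b) && !(a == 0) then validChainLoop a (b :: rest) else false
  | _ => false

-- ===== PORT B =====
def validChain_alt (chain : List Int) : Bool :=
  if chain.length ≤ 1 || chain.getD 0 0 == 0 || chain.getD 0 0 == chain.getD 1 0 then false
  else
    let rest := chain.tail
    let cut := (PySem.List.index? rest (0 : Int)).getD rest.length
    (rest.take cut).contains (chain.getD 0 0)

-- ===== PRECONDITION & SPEC =====
def Spec_validChain (chain : List Int) (out : Bool) : Prop := out = validChain_alt chain
instance (chain : List Int) (out : Bool) : Decidable (Spec_validChain chain out) := by unfold Spec_validChain; infer_instance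

-- ===== CLAIM (what is proved, stated in full; the proofs are below) =====
def Claim_equal_validChain : Prop := ∀ (chain : List Int), Dom_validChain chain → Spec_validChain chain (validChain chain)

-- ===== LEMMAS AND PROOFS =====
lemma validChainLoop_eq (c0 : Int) (rest : List Int) (hc0 : c0 ≠ 0) :
    validChainLoop c0 rest
      = (rest.take ((PySem.List.index? rest (0 : Int)).getD rest.length)).contains c0 := by
  simp only [PySem.List.index?_eq_idxOf?]
  induction rest with
  | nil => simp [validChainLoop]
  | cons x xs ih =>
    by_cases hx0 : x = 0
    · subst hx0
      simp [validChainLoop, List.idxOf?_cons]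
    · have hidx : List.idxOf? (0 : Int) (x :: xs) = (List.idxOf? 0 xs).map (· + 1) := by
        simp [List.idxOf?_cons, hx0]
      by_cases hxc : x = c0
      · subst hxc
        cases h : List.idxOf? (0 : Int) xs with
        | none => simp [validChainLoop, hx0, hidx, h]
        | some k => simp [validChainLoop, hx0, hidx, h]
      · cases h : List.idxOf? (0 : Int) xs with
        | none => simpa [validChainLoop, hx0, hxc, hidx, h, Ne.symm hxc] using ih
        | some k => simpa [validChainLoop, hx0, hxc, hidx, h, Ne.symm hxc] using ih

-- ===== VERDICT (by name: the statement is the Claim_ definition above) =====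
theorem validChain_spec : Claim_equal_validChain := by
  intro chain _
  unfold Spec_validChain
  match chain with
  | [] => rfl
  | [_] => rfl
  | a :: b :: rest =>
    by_cases ha0 : a = 0
    · simp [validChain, validChain_alt, ha0]
    · by_cases hab : a = b
      · simp [validChain, validChain_alt, hab]
      · have h1 : (!(a == b) && !(a == 0)) = true := by simp [hab, ha0]
        simp [validChain, validChain_alt, h1, ha0, hab,
          validChainLoop_eq a (b :: rest) ha0]
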